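-- pv_equiv track=rewrite | github.com/surajvkothari/Padlock-Web-Version | AES_Cipher.py | getHexedPlainText
-- ===== SOURCE A (Python) =====
-- def getHexedPlainText(plainText):
--     """ Returns the plaintext in hex form and separates it into blocks of 32 into a list. """
--
--     # Creates a list of each character from the plaintext
--     plainText = list(plainText)
--
--     # Converts each character, in the plaintext, to hex from the list
--     hexedCharsList = [hex(ord(char))[2:] for char in plainText]
--
--     # Concatenates the list into a string
--     hexedPlainText = "".join(hexedCharsList)
--
--     """
--     Padds the hexed plaintext with 0s to the end to ensure it is
--     a multiple of 32 hexadecimal characters.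
--     """
--
--     length = len(hexedPlainText)
--
--     # Only add the 0s if the length is not a multiple of 32
--     if length % 32 != 0:
--         """
--         The ammount of padding is determined by finding
--         the next multiple of 16 closest to the length: ((length // 16) + 1).
--         By subtracting this multiple from the actual length, it will give
--         the number of 0s needed to make the length a multiple of 16.
--         """
--
--         padding = ((((length // 32) + 1) * 32) - length)
--
--         # Adds the appropriate number of 0s onto the end of the hexed plaintext
--         hexedPlainText += ("0" * padding)
--
--     # Separates the hexed plaintext into blocks of 32
--     hexedPlainText32 = [hexedPlainText[i:i+32] for i in range(0, len(hexedPlainText), 32)]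
--
--     # Separates the individual hex blocks of 32 into pairs of bytes
--     hexedPlainTextBytes = []
--
--     for h in hexedPlainText32:
--         # Separates each hexed plaintext block into individual hex bytes
--         hByte = [h[i:i+2] for i in range(0, len(h), 2)]
--         hexedPlainTextBytes.append(hByte)
--
--
--     return hexedPlainTextBytes
-- ===== SOURCE B (Python) =====
-- def getHexedPlainText(plainText):
--     """ Returns the plaintext in hex form and separates it into blocks of 32 into a list. """
--     # Single streaming pass: feed hex digits through a small state machine that
--     # assembles bytes and blocks on the fly; no intermediate padded string or slicing.
--     blocks = []
--     block = []
--     pending = ""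
--     for c in plainText:
--         for d in format(ord(c), "x"):
--             if pending:
--                 block.append(pending + d)
--                 pending = ""
--                 if len(block) == 16:
--                     blocks.append(block)
--                     block = []
--             else:
--                 pending = d
--     # Zero-pad the tail: complete a half byte, then fill the last block with "00".
--     if pending:
--         block.append(pending + "0")
--     if block:
--         block.extend(["00"] * (16 - len(block)))
--         blocks.append(block)
--     return blocks
-- ===== Notes on version B (the rewrite author's own statement) =====
-- stated objective: alternative
-- what changed: A builds the full hex string, pads it to a multiple of 32, slices it into 32-char blocks and splits each block into pairs; B never materialises the padded string: a single streaming pass feeds each hex digit into a state machine (pending half-byte, current block, finished blocks) that assembles bytes and 16-byte blocks on the fly and zero-fills only the tail at the end.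
import Mathlib
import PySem

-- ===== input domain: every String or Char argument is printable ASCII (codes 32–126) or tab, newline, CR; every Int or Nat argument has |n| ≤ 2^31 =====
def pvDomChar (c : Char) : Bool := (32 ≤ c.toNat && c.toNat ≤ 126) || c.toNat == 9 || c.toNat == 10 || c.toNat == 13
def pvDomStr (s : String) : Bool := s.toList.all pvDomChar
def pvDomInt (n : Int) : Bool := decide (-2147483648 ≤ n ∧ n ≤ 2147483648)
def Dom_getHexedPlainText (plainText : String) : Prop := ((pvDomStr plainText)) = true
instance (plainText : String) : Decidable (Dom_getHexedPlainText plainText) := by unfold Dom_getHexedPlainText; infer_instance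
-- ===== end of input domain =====

-- B replaces A's build-pad-slice pipeline by a single streaming pass: a state machine over
-- the hex digits assembles bytes and 16-byte blocks on the fly (objective: alternative).

-- hex digit character for n < 16
def pvHexDigit (n : Nat) : Char := if n < 10 then Char.ofNat (48 + n) else Char.ofNat (87 + n)

-- hex(ord(c))[2:] / format(ord(c), "x") — exact for code points < 256 (Dom guarantees codes ≤ 126)
def pvHexOrd (c : Char) : List Char :=
  let n := c.toNat
  if n < 16 then [pvHexDigit n] else [pvHexDigit (n / 16), pvHexDigit (n % 16)]

-- ===== PORT A =====
def getHexedPlainText (plainText : String) : List (List String) :=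
  let chars := plainText.toList
  let hexedCharsList := chars.map pvHexOrd
  let hexedPlainText := hexedCharsList.flatten
  let length := hexedPlainText.length
  let hexedPlainText2 :=
    if length % 32 ≠ 0 then
      hexedPlainText ++ List.replicate (((length / 32) + 1) * 32 - length) '0'
    else hexedPlainText
  let hexedPlainText32 := (PySem.List.pyRange 0 (hexedPlainText2.length : Int) 32).map
      (fun i => PySem.List.slice hexedPlainText2 (some i) (some (i + 32)))
  hexedPlainText32.foldl (fun acc h =>
      acc ++ [(PySem.List.pyRange 0 (h.length : Int) 2).map
        (fun i => String.ofList (PySem.List.slice h (some i) (some (i + 2))))]) []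

-- ===== PORT B =====
-- one digit fed into B's state machine (blocks so far, current block, pending half-byte)
def pvStep (st : List (List String) × List String × Option Char) (d : Char) :
    List (List String) × List String × Option Char :=
  match st with
  | (blocks, block, pending) =>
    match pending with
    | some p =>
      let block' := block ++ [String.ofList [p, d]]
      if block'.length = 16 then (blocks ++ [block'], [], none) else (blocks, block', none)
    | none => (blocks, block, some d)

-- B's tail code: zero-complete a half byte, fill the last block with "00"
def pvFinal (st : List (List String) × List String × Option Char) : List (List String) :=
  match st with
  | (blocks, block, pending) =>
    let block2 := match pending with
      | some p => block ++ [String.ofList [p, '0']]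
      | none => block
    if block2 ≠ [] then blocks ++ [block2 ++ List.replicate (16 - block2.length) "00"]
    else blocks

def getHexedPlainText_alt (plainText : String) : List (List String) :=
  pvFinal (plainText.toList.foldl (fun st c => (pvHexOrd c).foldl pvStep st) ([], [], none))

-- ===== PRECONDITION & SPEC =====
def Spec_getHexedPlainText (plainText : String) (out : List (List String)) : Prop := out = getHexedPlainText_alt plainText
instance (plainText : String) (out : List (List String)) : Decidable (Spec_getHexedPlainText plainText out) := by unfold Spec_getHexedPlainText; infer_instance

-- ===== CLAIM (what is proved, stated in full; the proofs are below) =====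
def Claim_equal_getHexedPlainText : Prop := ∀ (plainText : String), Dom_getHexedPlainText plainText → Spec_getHexedPlainText plainText (getHexedPlainText plainText)

-- ===== LEMMAS AND PROOFS =====

-- chunks of size c+1
def pvChunks {α : Type} (c : Nat) : List α → List (List α)
  | [] => []
  | a :: t => ((a :: t).take (c+1)) :: pvChunks c ((a :: t).drop (c+1))
termination_by l => l.length
decreasing_by simp

def pvBytes (l : List Char) : List String := (pvChunks 1 l).map (fun p => String.ofList p)

theorem pvChunks_nil {α : Type} (c : Nat) : pvChunks (α := α) c [] = [] := by simp [pvChunks]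

theorem pvChunks_eq_map {α : Type} (c : Nat) (l : List α) :
    pvChunks c l = (List.range ((l.length + c) / (c+1))).map
      (fun k => (l.drop ((c+1)*k)).take (c+1)) := by
  match l with
  | [] => simp [pvChunks]
  | a :: t =>
    rw [pvChunks]
    have ih := pvChunks_eq_map c ((a :: t).drop (c+1))
    have hlen : (a :: t).length = t.length + 1 := by simp
    by_cases h : t.length + 1 ≤ c + 1
    · have hd : (a :: t).drop (c+1) = [] := by
        apply List.drop_eq_nil_of_le; omega
      have hm : (t.length + 1 + c) / (c+1) = 1 := by
        apply Nat.div_eq_of_lt_le <;> omega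
      simp [hd, hm, pvChunks, List.take_of_length_le (by omega : t.length ≤ c)]
    · have hm : ((a :: t).length + c) / (c+1) = (((a :: t).drop (c+1)).length + c) / (c+1) + 1 := by
        have : (a :: t).length + c = (((a :: t).drop (c+1)).length + c) + (c+1) := by
          simp; omega
        rw [this, Nat.add_div_right _ (by omega)]
      rw [ih, hlen] at *
      rw [hm, List.range_succ_eq_map]
      simp only [List.map_cons, List.map_map]
      congr 1
      apply List.map_congr_left
      intro k _
      simp only [Function.comp_apply, List.drop_drop, List.drop_succ_cons]
      have h1 : (c + 1) * (k + 1) = (c + (c + 1) * k) + 1 := by ring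
      rw [h1, List.drop_succ_cons]
termination_by l.length
decreasing_by simp

theorem pyChunk_eq {α : Type} (s' : Nat) (hs : 0 < s') (l : List α) :
    (PySem.List.pyRange 0 (l.length : Int) (s' : Int)).map
      (fun i => PySem.List.slice l (some i) (some (i + (s' : Int)))) = pvChunks (s'-1) l := by
  have hs' : (0:Int) < (s':Int) := by exact_mod_cast hs
  rw [PySem.List.pyRange_of_pos _ _ hs', pvChunks_eq_map, List.map_map]
  have hc : s' - 1 + 1 = s' := Nat.succ_pred_eq_of_pos hs
  rw [hc]
  have hM : (if (0:Int) < (l.length:Int) then (((l.length:Int) - 0 + (s':Int) - 1) / (s':Int)).toNat else 0)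
      = (l.length + (s' - 1)) / s' := by
    by_cases h0 : 0 < l.length
    · rw [if_pos (by exact_mod_cast h0)]
      have e1 : ((l.length:Int) - 0 + (s':Int) - 1) = ((l.length + (s'-1) : Nat) : Int) := by
        push_cast; omega
      rw [e1, ← Int.natCast_div, Int.toNat_natCast]
    · rw [if_neg (by exact_mod_cast h0)]
      have e0 : l.length = 0 := by omega
      rw [e0]
      symm
      apply Nat.div_eq_of_lt
      omega
  rw [hM]
  apply List.map_congr_left
  intro k hk
  simp only [Function.comp_apply]
  have e2 : ((0:Int) + (s':Int) * (k:Int)) = ((s' * k : Nat) : Int) := by push_cast; ring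
  rw [e2, PySem.List.slice_natCast_add]

theorem pvChunks_of_short {α : Type} (c : Nat) (l : List α) (hne : l ≠ []) (hle : l.length ≤ c+1) :
    pvChunks c l = [l] := by
  match l with
  | a :: t =>
    rw [pvChunks]
    rw [List.take_of_length_le (by simpa using hle), List.drop_eq_nil_of_le (by simpa using hle)]
    rw [pvChunks_nil]

theorem pvChunks_cons_of_full {α : Type} (c : Nat) (x y : List α) (h : x.length = c+1) :
    pvChunks c (x ++ y) = x :: pvChunks c y := by
  match x with
  | [] => simp at h
  | a :: t =>
    rw [List.cons_append, pvChunks, ← List.cons_append]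
    rw [List.take_append_of_le_length (by omega), List.take_of_length_le (by omega)]
    rw [List.drop_append_of_le_length (by omega), List.drop_eq_nil_of_le (by omega), List.nil_append]

theorem pvChunks_append {α : Type} (c k : Nat) (x y : List α) (h : x.length = (c+1) * k) :
    pvChunks c (x ++ y) = pvChunks c x ++ pvChunks c y := by
  induction k generalizing x with
  | zero =>
    have : x = [] := by
      apply List.eq_nil_of_length_eq_zero; omega
    simp [this, pvChunks_nil]
  | succ k ih =>
    rw [Nat.mul_succ] at h
    have htake : (x.take (c+1)).length = c+1 := by rw [List.length_take]; omega
    have hdrop : (x.drop (c+1)).length = (c+1) * k := by rw [List.length_drop]; omega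
    have hxt : x = x.take (c+1) ++ x.drop (c+1) := (List.take_append_drop _ _).symm
    calc pvChunks c (x ++ y)
        = pvChunks c (x.take (c+1) ++ (x.drop (c+1) ++ y)) := by
          rw [← List.append_assoc, ← hxt]
      _ = x.take (c+1) :: pvChunks c (x.drop (c+1) ++ y) := pvChunks_cons_of_full c _ _ htake
      _ = x.take (c+1) :: (pvChunks c (x.drop (c+1)) ++ pvChunks c y) := by rw [ih _ hdrop]
      _ = (x.take (c+1) :: pvChunks c (x.drop (c+1))) ++ pvChunks c y := rfl
      _ = pvChunks c (x.take (c+1) ++ x.drop (c+1)) ++ pvChunks c y := by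
          rw [pvChunks_cons_of_full c _ _ htake]
      _ = pvChunks c x ++ pvChunks c y := by rw [← hxt]

theorem pvChunks_length {α : Type} (c : Nat) (l : List α) :
    (pvChunks c l).length = (l.length + c) / (c+1) := by
  simp [pvChunks_eq_map]

-- core regrouping lemma: 16 bytes of 2 = one block of 32
theorem chunks_chunks {α β : Type} (f : List α → β) (l : List α) :
    pvChunks 15 ((pvChunks 1 l).map f) = (pvChunks 31 l).map (fun h => (pvChunks 1 h).map f) := by
  match l with
  | [] => simp [pvChunks_nil]
  | a :: t =>
    by_cases hlen : (a :: t).length ≤ 32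
    · have hne : (pvChunks 1 (a :: t)).map f ≠ [] := by
        intro hcon
        have hL : ((pvChunks 1 (a :: t)).map f).length = ((a :: t).length + 1) / 2 := by
          rw [List.length_map, pvChunks_length]
        rw [hcon] at hL
        simp at hL
        omega
      have hle : ((pvChunks 1 (a :: t)).map f).length ≤ 16 := by
        rw [List.length_map, pvChunks_length]
        simp only [List.length_cons] at hlen ⊢
        omega
      rw [pvChunks_of_short 31 _ (by simp) hlen, pvChunks_of_short 15 _ hne hle]
      simp
    · simp only [List.length_cons, not_le] at hlen
      have h32 : ((a :: t).take 32).length = 32 := by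
        rw [List.length_take]
        simp only [List.length_cons]
        omega
      have hsplit : a :: t = (a :: t).take 32 ++ (a :: t).drop 32 := (List.take_append_drop _ _).symm
      conv_lhs => rw [hsplit]
      conv_rhs => rw [hsplit]
      rw [pvChunks_append 1 16 _ _ (by rw [h32]), List.map_append]
      rw [pvChunks_cons_of_full 15 _ _ (by rw [List.length_map, pvChunks_length, h32])]
      rw [pvChunks_cons_of_full 31 _ _ h32]
      rw [List.map_cons]
      rw [chunks_chunks f ((a :: t).drop 32)]
termination_by l.length
decreasing_by simp

theorem pyChunk32 {α : Type} (l : List α) :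
    (PySem.List.pyRange 0 (l.length : Int) 32).map
      (fun i => PySem.List.slice l (some i) (some (i + 32))) = pvChunks 31 l := by
  have h := pyChunk_eq (α := α) 32 (by norm_num) l
  norm_num at h
  exact h

theorem pyChunk2_map {α β : Type} (g : List α → β) (l : List α) :
    (PySem.List.pyRange 0 (l.length : Int) 2).map
      (fun i => g (PySem.List.slice l (some i) (some (i + 2)))) = (pvChunks 1 l).map g := by
  have h := pyChunk_eq (α := α) 2 (by norm_num) l
  norm_num at h
  rw [show (fun i => g (PySem.List.slice l (some i) (some (i + 2))))
      = g ∘ (fun i => PySem.List.slice l (some i) (some (i + 2))) from rfl]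
  rw [← List.map_map, h]

-- pvBytes basics
theorem pvBytes_cons2 (d1 d2 : Char) (t : List Char) :
    pvBytes (d1 :: d2 :: t) = String.ofList [d1, d2] :: pvBytes t := by
  simp [pvBytes, pvChunks]

theorem pvBytes_length_even (l : List Char) (h : l.length % 2 = 0) :
    (pvBytes l).length = l.length / 2 := by
  rw [pvBytes, List.length_map, pvChunks_length]
  omega

theorem pvBytes_append (x y : List Char) (h : x.length % 2 = 0) :
    pvBytes (x ++ y) = pvBytes x ++ pvBytes y := by
  rw [pvBytes, pvChunks_append 1 (x.length / 2) x y (by omega), List.map_append]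
  rfl

theorem pvBytes_replicate (k : Nat) :
    pvBytes (List.replicate (2 * k) '0') = List.replicate k "00" := by
  induction k with
  | zero => simp [pvBytes, pvChunks_nil]
  | succ k ih =>
    have h2 : 2 * (k + 1) = (2 * k) + 1 + 1 := by omega
    rw [h2, List.replicate_succ, List.replicate_succ, pvBytes_cons2, ih, List.replicate_succ]

theorem pvBytes_ne_nil (l : List Char) (h : l ≠ []) : pvBytes l ≠ [] := by
  intro hcon
  have hL : (pvBytes l).length = (l.length + 1) / 2 := by
    rw [pvBytes, List.length_map, pvChunks_length]
  rw [hcon] at hL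
  have : l.length = 0 := by simp at hL; omega
  exact h (List.eq_nil_of_length_eq_zero this)

-- streaming an even number of digits
theorem stream_even (h : List Char) (blocks : List (List String)) (block : List String)
    (hpar : h.length % 2 = 0) (hb : block.length + h.length / 2 ≤ 16) :
    List.foldl pvStep (blocks, block, none) h =
      if h ≠ [] ∧ block.length + h.length / 2 = 16
      then (blocks ++ [block ++ pvBytes h], [], none)
      else (blocks, block ++ pvBytes h, none) := by
  match h with
  | [] => simp [pvBytes, pvChunks_nil]
  | [d] => simp at hpar
  | d1 :: d2 :: t =>
    have hpt : t.length % 2 = 0 := by simp at hpar; omega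
    simp only [List.foldl_cons]
    have s1 : pvStep (blocks, block, none) d1 = (blocks, block, some d1) := rfl
    rw [s1]
    by_cases hfull : (block ++ [String.ofList [d1, d2]]).length = 16
    · have hb15 : block.length = 15 := by simpa using hfull
      have ht0 : t = [] := by
        have := hb
        simp only [List.length_cons] at this
        have : t.length = 0 := by omega
        exact List.eq_nil_of_length_eq_zero this
      subst ht0
      have s2 : pvStep (blocks, block, some d1) d2
          = (blocks ++ [block ++ [String.ofList [d1, d2]]], [], none) := by
        simp [pvStep, hfull]
      rw [s2]
      have hbyte : pvBytes [d1, d2] = [String.ofList [d1, d2]] := by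
        simp [pvBytes, pvChunks]
      rw [List.foldl_nil, if_pos ⟨by simp, by simp [hb15]⟩, hbyte]
    · have hb15 : ¬ block.length = 15 := by
        intro h15
        exact hfull (by simp [h15])
      have s2 : pvStep (blocks, block, some d1) d2
          = (blocks, block ++ [String.ofList [d1, d2]], none) := by
        simp [pvStep, hb15]
      rw [s2]
      have hlen' : (block ++ [String.ofList [d1, d2]]).length = block.length + 1 := by simp
      have hb' : (block ++ [String.ofList [d1, d2]]).length + t.length / 2 ≤ 16 := by
        simp only [hlen']
        simp only [List.length_cons] at hb
        omega
      rw [stream_even t blocks (block ++ [String.ofList [d1, d2]]) hpt hb']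
      rw [pvBytes_cons2]
      by_cases hc : t ≠ [] ∧ (block ++ [String.ofList [d1, d2]]).length + t.length / 2 = 16
      · rw [if_pos hc]
        have hc2 : (d1 :: d2 :: t) ≠ [] ∧ block.length + (d1 :: d2 :: t).length / 2 = 16 := by
          constructor
          · simp
          · simp only [List.length_cons]
            simp only [hlen'] at hc
            omega
        rw [if_pos hc2]
        simp
      · rw [if_neg hc]
        have hc2 : ¬ ((d1 :: d2 :: t) ≠ [] ∧ block.length + (d1 :: d2 :: t).length / 2 = 16) := by
          intro hcon
          apply hc
          rcases hcon with ⟨-, he⟩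
          simp only [List.length_cons] at he
          constructor
          · intro ht0
            subst ht0
            simp only [List.length_nil] at he
            apply hfull
            simp only [hlen']
            omega
          · simp only [hlen']
            omega
        rw [if_neg hc2]
        simp
termination_by h.length
decreasing_by simp

-- a full 32-digit block
theorem stream_block32 (h : List Char) (blocks : List (List String)) (hlen : h.length = 32) :
    List.foldl pvStep (blocks, [], none) h = (blocks ++ [pvBytes h], [], none) := by
  rw [stream_even h blocks [] (by omega) (by simp [hlen])]
  rw [if_pos ⟨by intro h0; rw [h0] at hlen; simp at hlen, by simp [hlen]⟩]
  simp

-- any multiple of 32 digits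
theorem stream_full (q : Nat) (ds : List Char) (blocks : List (List String))
    (hlen : ds.length = 32 * q) :
    List.foldl pvStep (blocks, [], none) ds
      = (blocks ++ (pvChunks 31 ds).map pvBytes, [], none) := by
  induction q generalizing ds blocks with
  | zero =>
    have : ds = [] := List.eq_nil_of_length_eq_zero (by omega)
    simp [this, pvChunks_nil]
  | succ q ih =>
    have htake : (ds.take 32).length = 32 := by rw [List.length_take]; omega
    have hdrop : (ds.drop 32).length = 32 * q := by rw [List.length_drop]; omega
    have hxt : ds = ds.take 32 ++ ds.drop 32 := (List.take_append_drop _ _).symm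
    conv_lhs => rw [hxt]
    rw [List.foldl_append, stream_block32 _ _ htake, ih _ _ hdrop]
    conv_rhs => rw [hxt]
    rw [pvChunks_cons_of_full 31 _ _ htake, List.map_cons]
    simp

-- the tail: fewer than 32 digits, then B's finalization, equals one zero-padded block
theorem stream_tail (rem : List Char) (blocks : List (List String))
    (hlt : rem.length < 32) (hne : rem ≠ []) :
    pvFinal (List.foldl pvStep (blocks, [], none) rem)
      = blocks ++ [pvBytes (rem ++ List.replicate (32 - rem.length) '0')] := by
  by_cases hpar : rem.length % 2 = 0
  · -- even tail
    rw [stream_even rem blocks [] hpar (by simp; omega)]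
    have hcond : ¬ (rem ≠ [] ∧ ([] : List String).length + rem.length / 2 = 16) := by
      intro hcon
      rcases hcon with ⟨-, he⟩
      simp at he
      omega
    rw [if_neg hcond]
    simp only [List.nil_append, pvFinal]
    rw [if_pos (pvBytes_ne_nil rem hne)]
    rw [pvBytes_append rem _ hpar,
        show (32 - rem.length) = 2 * (16 - rem.length / 2) from by omega,
        pvBytes_replicate, pvBytes_length_even rem hpar]
  · -- odd tail: peel the last digit
    have hdl : rem = rem.dropLast ++ [rem.getLast hne] := (List.dropLast_append_getLast hne).symm
    have hdlen : rem.dropLast.length = rem.length - 1 := by rw [List.length_dropLast]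
    have hdpar : rem.dropLast.length % 2 = 0 := by omega
    conv_lhs => rw [hdl]
    rw [List.foldl_append]
    rw [stream_even rem.dropLast blocks [] hdpar (by simp; omega)]
    have hcond : ¬ (rem.dropLast ≠ [] ∧ ([] : List String).length + rem.dropLast.length / 2 = 16) := by
      intro hcon
      rcases hcon with ⟨-, he⟩
      simp at he
      omega
    rw [if_neg hcond]
    simp only [List.nil_append, List.foldl_cons, List.foldl_nil]
    have s1 : pvStep (blocks, pvBytes rem.dropLast, none) (rem.getLast hne)
        = (blocks, pvBytes rem.dropLast, some (rem.getLast hne)) := rfl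
    rw [s1]
    simp only [pvFinal]
    have hbne : pvBytes rem.dropLast ++ [String.ofList [rem.getLast hne, '0']] ≠ [] := by simp
    rw [if_pos hbne]
    have hb2 : pvBytes rem.dropLast ++ [String.ofList [rem.getLast hne, '0']]
        = pvBytes (rem.dropLast ++ [rem.getLast hne, '0']) := by
      rw [pvBytes_append _ _ hdpar]
      congr 1
      simp [pvBytes, pvChunks]
    rw [hb2]
    have hrep : List.replicate (32 - rem.length) '0'
        = '0' :: List.replicate (2 * (16 - (rem.length + 1) / 2)) '0' := by
      rw [show 32 - rem.length = 2 * (16 - (rem.length + 1) / 2) + 1 from by omega,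
          List.replicate_succ]
    have hkey : rem ++ List.replicate (32 - rem.length) '0'
        = (rem.dropLast ++ [rem.getLast hne, '0'])
            ++ List.replicate (2 * (16 - (rem.length + 1) / 2)) '0' := by
      rw [hrep]
      conv_lhs => rw [hdl]
      have h1 : 1 ≤ rem.length := List.length_pos_of_ne_nil hne
      simp
      omega
    have hlen2 : (rem.dropLast ++ [rem.getLast hne, '0']).length = rem.length + 1 := by
      have h1 : 1 ≤ rem.length := List.length_pos_of_ne_nil hne
      simp [hdlen]
      omega
    rw [hkey]
    rw [show pvBytes (rem.dropLast ++ [rem.getLast hne, '0']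
          ++ List.replicate (2 * (16 - (rem.length + 1) / 2)) '0')
        = (pvBytes rem.dropLast ++ [String.ofList [rem.getLast hne, '0']])
            ++ List.replicate (16 - (rem.length + 1) / 2) "00" from by
      rw [pvBytes_append (rem.dropLast ++ [rem.getLast hne, '0']) _ (by rw [hlen2]; omega),
          pvBytes_replicate, ← hb2]]
    rw [← hb2]
    have hlen3 : (pvBytes rem.dropLast ++ [String.ofList [rem.getLast hne, '0']]).length
        = (rem.length + 1) / 2 := by
      rw [hb2, pvBytes_length_even _ (by rw [hlen2]; omega), hlen2]
    rw [hlen3]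

-- A's padding if-expression in closed form
theorem A_pad (hex : List Char) :
    (if hex.length % 32 ≠ 0 then
        hex ++ List.replicate (((hex.length / 32) + 1) * 32 - hex.length) '0'
      else hex)
      = hex ++ List.replicate ((32 - hex.length % 32) % 32) '0' := by
  split_ifs with h
  · congr 2
    omega
  · have : (32 - hex.length % 32) % 32 = 0 := by omega
    simp [this]

-- the folded per-character loop of B equals folding over the flat digit list
theorem stream_flatten (cs : List Char)
    (st : List (List String) × List String × Option Char) :
    cs.foldl (fun st c => (pvHexOrd c).foldl pvStep st) st
      = List.foldl pvStep st (cs.map pvHexOrd).flatten := by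
  induction cs generalizing st with
  | nil => rfl
  | cons c t ih => simp [List.foldl_append, ih]

-- both programs equal the mid-level form: 16-byte chunks of the byte list of the padded digits
theorem A_eq_mid (p : String) :
    getHexedPlainText p
      = pvChunks 15 (pvBytes ((p.toList.map pvHexOrd).flatten
          ++ List.replicate ((32 - (p.toList.map pvHexOrd).flatten.length % 32) % 32) '0')) := by
  unfold getHexedPlainText
  simp only []
  rw [A_pad]
  generalize ((p.toList.map pvHexOrd).flatten
      ++ List.replicate ((32 - (p.toList.map pvHexOrd).flatten.length % 32) % 32) '0' : List Char) = s
  rw [PySem.List.foldl_append_singleton_eq_map, List.nil_append]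
  rw [pyChunk32]
  simp only [pyChunk2_map]
  rw [pvBytes, chunks_chunks]

theorem B_eq_mid (p : String) :
    getHexedPlainText_alt p
      = pvChunks 15 (pvBytes ((p.toList.map pvHexOrd).flatten
          ++ List.replicate ((32 - (p.toList.map pvHexOrd).flatten.length % 32) % 32) '0')) := by
  unfold getHexedPlainText_alt
  rw [stream_flatten]
  generalize ((p.toList.map pvHexOrd).flatten : List Char) = ds
  have hsplit : ds = ds.take (32 * (ds.length / 32)) ++ ds.drop (32 * (ds.length / 32)) :=
    (List.take_append_drop _ _).symm
  have htake : (ds.take (32 * (ds.length / 32))).length = 32 * (ds.length / 32) := by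
    rw [List.length_take]; omega
  have hdrop : (ds.drop (32 * (ds.length / 32))).length = ds.length % 32 := by
    rw [List.length_drop]; omega
  by_cases hz : ds.length % 32 = 0
  · -- no remainder, no padding
    have hds' : ds.length = 32 * (ds.length / 32) := by omega
    rw [stream_full (ds.length / 32) ds [] hds']
    simp only [pvFinal]
    rw [if_neg (by simp)]
    rw [show (32 - ds.length % 32) % 32 = 0 from by omega]
    simp only [List.replicate_zero, List.append_nil, List.nil_append]
    simp only [pvBytes]
    rw [chunks_chunks]
    rfl
  · -- remainder: full blocks then the padded tail
    set x := ds.take (32 * (ds.length / 32)) with hxdef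
    set y := ds.drop (32 * (ds.length / 32)) with hydef
    conv_lhs => rw [hsplit]
    rw [List.foldl_append, stream_full (ds.length / 32) x [] htake, List.nil_append]
    rw [stream_tail y _ (by omega) (by
      intro h0
      rw [h0] at hdrop
      simp at hdrop
      omega)]
    rw [show (32 - ds.length % 32) % 32 = 32 - y.length from by omega]
    conv_rhs => rw [hsplit]
    rw [List.append_assoc, pvBytes_append x _ (by omega),
        pvChunks_append 15 (ds.length / 32) _ _
          (by rw [pvBytes_length_even x (by omega)]; omega)]
    congr 1
    · simp only [pvBytes]
      rw [chunks_chunks]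
      rfl
    · have h32 : (y ++ List.replicate (32 - y.length) '0').length = 32 := by
        simp
        omega
      rw [pvChunks_of_short 15 _
        (pvBytes_ne_nil _ (by
          intro h0
          rw [h0] at h32
          simp at h32))
        (by rw [pvBytes_length_even _ (by rw [h32]), h32])]

-- ===== VERDICT (by name: the statement is the Claim_ definition above) =====
theorem getHexedPlainText_spec : Claim_equal_getHexedPlainText := by
  intro plainText _
  unfold Spec_getHexedPlainText
  rw [A_eq_mid, B_eq_mid]
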